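-- pv_equiv track=rewrite | github.com/anacarolbs/grafos | grafos.py | get_vizinho_antecessor
-- ===== SOURCE A (Python) =====
-- def get_vizinho_antecessor(grafo: dict, grupo: tuple | list | set | int) -> set:
--     grupo = set(grupo)
--     vizinhanca = set()
--     for vertice in grupo:
--         for v, adjacentes in grafo.items():
--             if vertice in adjacentes:
--                 vizinhanca.update([v])
--     vizinhanca -= grupo
--     return vizinhanca
-- ===== SOURCE B (Python) =====
-- def get_vizinho_antecessor(grafo: dict, grupo: tuple | list | set | int) -> set:
--     grupo = set(grupo)
--     # build a reverse-adjacency index once: target -> list of source vertices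
--     rev = {}
--     for v, adjacentes in grafo.items():
--         for t in set(adjacentes):
--             rev.setdefault(t, []).append(v)
--     vizinhanca = set()
--     for vertice in grupo:
--         for v in rev.get(vertice, ()):
--             vizinhanca.add(v)
--     return vizinhanca - grupo
-- ===== Notes on version B (the rewrite author's own statement) =====
-- stated objective: faster
-- what changed: B builds a reverse-adjacency index (target -> sources) in one pass over the graph and then looks each group vertex up directly, instead of rescanning every adjacency list of the whole graph for every group vertex.
import Mathlib
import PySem

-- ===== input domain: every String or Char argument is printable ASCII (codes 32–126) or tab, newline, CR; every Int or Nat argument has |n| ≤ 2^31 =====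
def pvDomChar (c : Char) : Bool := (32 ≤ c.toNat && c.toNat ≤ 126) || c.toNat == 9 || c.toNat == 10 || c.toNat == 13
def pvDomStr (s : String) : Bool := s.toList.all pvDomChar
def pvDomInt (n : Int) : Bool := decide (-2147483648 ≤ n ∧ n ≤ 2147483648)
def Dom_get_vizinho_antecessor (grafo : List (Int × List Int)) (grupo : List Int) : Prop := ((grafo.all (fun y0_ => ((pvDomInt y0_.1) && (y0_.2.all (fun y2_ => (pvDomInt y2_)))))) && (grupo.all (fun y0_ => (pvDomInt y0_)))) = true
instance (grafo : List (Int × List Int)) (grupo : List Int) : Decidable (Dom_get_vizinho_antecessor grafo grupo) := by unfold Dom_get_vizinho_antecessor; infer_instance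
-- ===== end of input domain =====

-- B replaces A's rescan of the whole graph per group vertex by a reverse-adjacency
-- index built once, then direct lookups (objective: faster, asymptotic).
-- Both programs return Python sets; ports iterate set elements in first-insertion order.

-- ===== PORT A =====
def get_vizinho_antecessor (grafo : List (Int × List Int)) (grupo : List Int) : List Int :=
  let grupoS : PySem.Set Int := PySem.Set.ofList grupo
  let vizinhanca : PySem.Set Int :=
    grupoS.foldl (fun viz vertice =>
      grafo.foldl (fun viz p =>
        if vertice ∈ p.2 then PySem.Set.update viz [p.1] else viz) viz) PySem.Set.empty
  PySem.Set.diff vizinhanca grupoS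

-- ===== PORT B =====
def get_vizinho_antecessor_alt (grafo : List (Int × List Int)) (grupo : List Int) : List Int :=
  let grupoS : PySem.Set Int := PySem.Set.ofList grupo
  let rev : PySem.Dict Int (List Int) :=
    grafo.foldl (fun d p =>
      (PySem.Set.ofList p.2).foldl (fun d t => d.modify t [] (· ++ [p.1])) d)
      PySem.Dict.empty
  let vizinhanca : PySem.Set Int :=
    grupoS.foldl (fun viz vertice =>
      (rev.getD vertice []).foldl (fun viz v => PySem.Set.add viz v) viz) PySem.Set.empty
  PySem.Set.diff vizinhanca grupoS

-- ===== PRECONDITION & SPEC =====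
def Spec_get_vizinho_antecessor (grafo : List (Int × List Int)) (grupo : List Int) (out : List Int) : Prop := out = get_vizinho_antecessor_alt grafo grupo
instance (grafo : List (Int × List Int)) (grupo : List Int) (out : List Int) : Decidable (Spec_get_vizinho_antecessor grafo grupo out) := by unfold Spec_get_vizinho_antecessor; infer_instance

-- ===== CLAIM (what is proved, stated in full; the proofs are below) =====
def Claim_equal_get_vizinho_antecessor : Prop := ∀ (grafo : List (Int × List Int)) (grupo : List Int), Dom_get_vizinho_antecessor grafo grupo → Spec_get_vizinho_antecessor grafo grupo (get_vizinho_antecessor grafo grupo)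

-- ===== LEMMAS AND PROOFS =====

-- Appending v under key t for every t in a duplicate-free list L appends v to
-- exactly the entries whose key is in L.
theorem pv_inner_modify (v x : Int) (L : List Int) (hL : L.Nodup) :
    ∀ (d : PySem.Dict Int (List Int)),
      (L.foldl (fun d t => d.modify t [] (· ++ [v])) d).getD x []
        = d.getD x [] ++ (if x ∈ L then [v] else []) := by
  induction L with
  | nil => intro d; simp
  | cons a L ih =>
    intro d
    have hnd := (List.nodup_cons.mp hL)
    simp only [List.foldl_cons, ih hnd.2]
    by_cases hxa : x = a
    · subst hxa
      have : x ∉ L := hnd.1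
      simp [PySem.Dict.getD_modify_self, this]
    · simp [PySem.Dict.getD_modify, hxa, List.mem_cons]

-- The reverse index's entry at x is the list of sources whose adjacency list contains x.
theorem pv_rev_getD (x : Int) (grafo : List (Int × List Int)) :
    ∀ (d : PySem.Dict Int (List Int)),
      ((grafo.foldl (fun d p =>
          (PySem.Set.ofList p.2).foldl (fun d t => d.modify t [] (· ++ [p.1])) d) d).getD x [])
        = d.getD x [] ++ ((grafo.filter (fun p => decide (x ∈ p.2))).map (·.1)) := by
  induction grafo with
  | nil => intro d; simp
  | cons p gs ih =>
    intro d
    simp only [List.foldl_cons, ih]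
    rw [pv_inner_modify p.1 x (PySem.Set.ofList p.2) (PySem.Set.nodup_ofList p.2)]
    by_cases hx : x ∈ p.2
    · simp [hx, PySem.Set.mem_ofList]
    · simp [hx, PySem.Set.mem_ofList]

-- A's inner scan over the whole graph collects exactly the sources adjacent to x.
theorem pv_A_inner (x : Int) (grafo : List (Int × List Int)) :
    ∀ (acc : PySem.Set Int),
      grafo.foldl (fun viz p =>
          if x ∈ p.2 then PySem.Set.update viz [p.1] else viz) acc
        = ((grafo.filter (fun p => decide (x ∈ p.2))).map (·.1)).foldl
            (fun viz v => PySem.Set.add viz v) acc := by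
  induction grafo with
  | nil => intro acc; simp
  | cons p gs ih =>
    intro acc
    simp only [List.foldl_cons, List.filter_cons]
    by_cases hx : x ∈ p.2
    · simp only [hx, decide_true, if_true, PySem.Set.update, List.foldl_cons, List.map_cons]
      exact ih _
    · simp only [hx, decide_false, if_false]
      exact ih _

-- ===== VERDICT (by name: the statement is the Claim_ definition above) =====
theorem get_vizinho_antecessor_spec : Claim_equal_get_vizinho_antecessor := by
  intro grafo grupo _
  unfold Spec_get_vizinho_antecessor get_vizinho_antecessor get_vizinho_antecessor_alt
  simp only []
  congr 1
  apply List.foldl_ext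
  intro viz vertice _
  rw [pv_A_inner, pv_rev_getD]
  simp
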